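-- pv_equiv track=rewrite | github.com/EthannP3/EthanMLCoursework | classification.py | TestValues
-- ===== SOURCE A (Python) =====
-- from itertools import combinations
--
-- def TestValues(y, z):
--     n = len(y)
--     CorrectCounter = 0
--     PairNumber = 0
--     for i, j in combinations(range(n), 2):
--         if (y[i] == y[j]):
--             CorrectCounter += (z[i] == z[j])
--             PairNumber += 1
--     IncorrectCounter = PairNumber - CorrectCounter
--     return IncorrectCounter, CorrectCounter
-- ===== SOURCE B (Python) =====
-- def TestValues(y, z):
--     ycount = {}
--     for v in y:
--         ycount[v] = ycount.get(v, 0) + 1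
--     yzcount = {}
--     for p in zip(y, z):
--         yzcount[p] = yzcount.get(p, 0) + 1
--     pairs = sum(k * (k - 1) // 2 for k in ycount.values())
--     correct = sum(k * (k - 1) // 2 for k in yzcount.values())
--     return pairs - correct, correct
-- ===== Notes on version B (the rewrite author's own statement) =====
-- stated objective: faster
-- what changed: Replaces the O(n^2) scan over all index pairs by one counting pass: group sizes for y and for (y,z) pairs are collected in dicts and each group contributes C(k,2) pairs, so the quadratic pair enumeration disappears.
import Mathlib
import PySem

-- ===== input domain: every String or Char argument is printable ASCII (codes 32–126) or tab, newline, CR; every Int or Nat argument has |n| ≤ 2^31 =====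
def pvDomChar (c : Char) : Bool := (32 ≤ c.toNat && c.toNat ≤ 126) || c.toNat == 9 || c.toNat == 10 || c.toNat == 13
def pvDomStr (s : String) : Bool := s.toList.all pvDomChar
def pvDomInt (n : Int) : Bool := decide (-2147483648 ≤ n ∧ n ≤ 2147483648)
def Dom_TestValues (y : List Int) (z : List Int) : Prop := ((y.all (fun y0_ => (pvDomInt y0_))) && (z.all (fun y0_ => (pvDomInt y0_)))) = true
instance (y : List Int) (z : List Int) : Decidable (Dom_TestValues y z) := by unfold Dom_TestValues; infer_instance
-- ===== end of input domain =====

-- ===== PORT A =====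
-- B groups labels in one pass and sums C(k,2) per group instead of scanning all O(n^2) index pairs (measured asymptotically faster).
-- itertools.combinations(range(n), 2), in its exact lexicographic order (pairs (i, j) with i < j < n)
def pvComb2 (n : Nat) : List (Nat × Nat) :=
  (List.range n).flatMap (fun i => (List.range (n - (i + 1))).map (fun k => (i, i + 1 + k)))

-- y is indexed only at i, j < len(y) (exact); z is indexed only when y[i] == y[j], where Pre_ guarantees
-- the index is in range, so getD is exact on Pre_.
def TestValues (y : List Int) (z : List Int) : Int × Int :=
  let n := y.length
  let s := (pvComb2 n).foldl (fun (s : Int × Int) q =>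
      if y.getD q.1 0 = y.getD q.2 0 then
        (s.1 + (if z.getD q.1 0 = z.getD q.2 0 then 1 else 0), s.2 + 1)
      else s) (0, 0)
  (s.2 - s.1, s.1)

-- ===== PORT B =====
def TestValues_alt (y : List Int) (z : List Int) : Int × Int :=
  let ycount := y.foldl (fun d v => d.insert v (d.getD v 0 + 1)) PySem.Dict.empty
  let yzcount := (y.zip z).foldl (fun d p => d.insert p (d.getD p 0 + 1)) PySem.Dict.empty
  let pairs := (ycount.values.map (fun k => PySem.Int.floordiv (k * (k - 1)) 2)).sum
  let correct := (yzcount.values.map (fun k => PySem.Int.floordiv (k * (k - 1)) 2)).sum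
  (pairs - correct, correct)

-- ===== PRECONDITION & SPEC =====
-- Pre_ excludes exactly the inputs where A raises IndexError: some pair i < j with y[i] == y[j] reaches
-- an index j >= len(z) in z.
def Pre_TestValues (y : List Int) (z : List Int) : Prop :=
  ∀ j, j < y.length → ∀ i, i < j → y.getD i 0 = y.getD j 0 → j < z.length
instance (y : List Int) (z : List Int) : Decidable (Pre_TestValues y z) := by unfold Pre_TestValues; infer_instance
def pvWitness_TestValues : List Int × List Int := ([1, 1, 2], [3, 4, 3])

def Spec_TestValues (y : List Int) (z : List Int) (out : Int × Int) : Prop := out = TestValues_alt y z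
instance (y : List Int) (z : List Int) (out : Int × Int) : Decidable (Spec_TestValues y z out) := by unfold Spec_TestValues; infer_instance

-- ===== CLAIM (what is proved, stated in full; the proofs are below) =====
def Claim_equal_TestValues : Prop := ∀ (y : List Int) (z : List Int), Dom_TestValues y z → Pre_TestValues y z → Spec_TestValues y z (TestValues y z)

-- ===== LEMMAS AND PROOFS =====

-- number of pairs i < j with l[i] = l[j]
def pairCt {α : Type} [BEq α] : List α → Nat
  | [] => 0
  | a :: t => t.count a + pairCt t

-- generic: countP distributes over flatMap
theorem pv_countP_flatMap {β γ : Type} (l : List β) (g : β → List γ) (P : γ → Bool) :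
    (l.flatMap g).countP P = (l.map (fun x => (g x).countP P)).sum := by
  induction l with
  | nil => simp
  | cons b t ih => simp [List.flatMap_cons, List.countP_append, ih]

-- generic: drop a suffix of range on which the predicate is false
theorem pv_countP_range_cut (K' K : Nat) (q : Nat → Bool) (h : K' ≤ K)
    (hF : ∀ k, K' ≤ k → k < K → q k = false) :
    (List.range K).countP q = (List.range K').countP q := by
  induction K with
  | zero =>
    have : K' = 0 := by omega
    simp [this]
  | succ K ih =>
    rcases Nat.eq_or_lt_of_le h with h' | h'
    · rw [h']
    · rw [List.range_succ, List.countP_append]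
      have := hF K (by omega) (by omega)
      simp [this]
      exact ih (by omega) (fun k hk hk' => hF k hk (by omega))

-- counting occurrences via indices
theorem pv_count_range {α : Type} [BEq α] [LawfulBEq α] [DecidableEq α] (t : List α) (x d : α) :
    (List.range t.length).countP (fun k => decide (x = t.getD k d)) = t.count x := by
  induction t with
  | nil => simp
  | cons b t ih =>
    rw [List.length_cons, List.range_succ_eq_map, List.countP_cons, List.countP_map]
    have : ((fun k => decide (x = (b :: t).getD k d)) ∘ Nat.succ) = (fun k => decide (x = t.getD k d)) := by
      funext k; simp
    rw [this, ih, List.count_cons]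
    by_cases hb : x = b
    · subst hb; simp
    · have hbx : (b == x) = false := by
        simp only [beq_eq_false_iff_ne, ne_eq]
        exact fun h => hb h.symm
      simp [hb, hbx]

-- the row decomposition of pvComb2 (n+1)
theorem pv_comb2_succ (n : Nat) :
    pvComb2 (n + 1) =
      (List.range n).map (fun k => ((0 : Nat), k + 1)) ++
      (pvComb2 n).map (fun q : Nat × Nat => (q.1 + 1, q.2 + 1)) := by
  unfold pvComb2
  rw [List.range_succ_eq_map, List.flatMap_cons]
  congr 1
  · simp [Nat.add_comm]
  · rw [List.flatMap_map, List.map_flatMap]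
    apply List.flatMap_congr
    intro i _
    rw [List.map_map]
    have : n + 1 - (Nat.succ i + 1) = n - (i + 1) := by omega
    rw [this]
    apply List.map_congr_left
    intro k _
    simp [Nat.succ_eq_add_one]; omega

-- the heart: the pair count over combinations equals the structural pair count
theorem pv_countP_comb2 {α : Type} [BEq α] [LawfulBEq α] [DecidableEq α] (w : List α) (d : α) :
    (pvComb2 w.length).countP (fun q => decide (w.getD q.1 d = w.getD q.2 d)) = pairCt w := by
  induction w with
  | nil => simp [pvComb2, pairCt]
  | cons a t ih =>
    rw [List.length_cons, pv_comb2_succ, List.countP_append, List.countP_map, List.countP_map]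
    have h1 : ((fun q => decide ((a :: t).getD q.1 d = (a :: t).getD q.2 d)) ∘ fun k => ((0 : Nat), k + 1))
        = (fun k => decide (a = t.getD k d)) := by
      funext k; simp
    have h2 : ((fun q => decide ((a :: t).getD q.1 d = (a :: t).getD q.2 d)) ∘ fun q : Nat × Nat => (q.1 + 1, q.2 + 1))
        = (fun q => decide (t.getD q.1 d = t.getD q.2 d)) := by
      funext q; simp
    rw [h1, h2, pv_count_range, ih, pairCt]

-- members of pvComb2 n are pairs i < j < n
theorem pv_mem_comb2 {n : Nat} {q : Nat × Nat} (h : q ∈ pvComb2 n) : q.1 < q.2 ∧ q.2 < n := by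
  unfold pvComb2 at h
  simp only [List.mem_flatMap, List.mem_map, List.mem_range] at h
  obtain ⟨i, hi, k, hk, rfl⟩ := h
  constructor <;> simp <;> omega

-- drop pairs beyond m on which the predicate is false
theorem pv_countP_comb2_cut (n m : Nat) (P : Nat × Nat → Bool) (hmn : m ≤ n)
    (hF : ∀ i j, i < j → j < n → m ≤ j → P (i, j) = false) :
    (pvComb2 n).countP P = (pvComb2 m).countP P := by
  unfold pvComb2
  rw [pv_countP_flatMap, pv_countP_flatMap]
  have hrow : ∀ i, i < n →
      ((List.range (n - (i + 1))).map (fun k => (i, i + 1 + k))).countP P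
      = ((List.range (m - (i + 1))).map (fun k => (i, i + 1 + k))).countP P := by
    intro i _
    rw [List.countP_map, List.countP_map]
    exact pv_countP_range_cut (m - (i + 1)) (n - (i + 1)) _ (by omega)
      (fun k hk hk' => hF i (i + 1 + k) (by omega) (by omega) (by omega))
  have hsplit : n = m + (n - m) := by omega
  rw [hsplit, List.range_add, List.map_append, List.sum_append]
  have hz : ((List.map (fun x => m + x) (List.range (n - m))).map
      (fun i => ((List.range (m + (n - m) - (i + 1))).map (fun k => (i, i + 1 + k))).countP P)).sum = 0 := by
    apply List.sum_eq_zero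
    intro x hx
    simp only [List.map_map, List.mem_map, List.mem_range] at hx
    obtain ⟨j, hj, rfl⟩ := hx
    show List.countP P (List.map (fun k => (m + j, m + j + 1 + k)) (List.range (m + (n - m) - (m + j + 1)))) = 0
    rw [List.countP_map]
    have hcut := pv_countP_range_cut 0 (m + (n - m) - (m + j + 1))
      (fun k => P (m + j, m + j + 1 + k)) (by omega)
      (fun k hk hk' => hF (m + j) (m + j + 1 + k) (by omega) (by omega) (by omega))
    have hcomp : (P ∘ fun k => (m + j, m + j + 1 + k)) = (fun k => P (m + j, m + j + 1 + k)) := rfl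
    rw [hcomp, hcut]
    simp
  rw [hz, Nat.add_zero]
  apply congrArg
  apply List.map_congr_left
  intro i hi
  rw [List.mem_range] at hi
  have : m + (n - m) - (i + 1) = n - (i + 1) := by omega
  rw [this]
  exact hrow i (by omega)

-- the fold in port A computes the two countP's
theorem pv_foldA (y z : List Int) (ps : List (Nat × Nat)) (c p : Int) :
    ps.foldl (fun (s : Int × Int) q =>
      if y.getD q.1 0 = y.getD q.2 0 then
        (s.1 + (if z.getD q.1 0 = z.getD q.2 0 then 1 else 0), s.2 + 1)
      else s) (c, p)
    = (c + (ps.countP (fun q => decide (y.getD q.1 0 = y.getD q.2 0 ∧ z.getD q.1 0 = z.getD q.2 0)) : Int),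
       p + (ps.countP (fun q => decide (y.getD q.1 0 = y.getD q.2 0)) : Int)) := by
  induction ps generalizing c p with
  | nil => simp
  | cons q t ih =>
    rw [List.foldl_cons, List.countP_cons, List.countP_cons]
    by_cases h1 : y.getD q.1 0 = y.getD q.2 0
    · by_cases h2 : z.getD q.1 0 = z.getD q.2 0
      · rw [if_pos h1, if_pos h2, ih]
        simp only [Prod.mk.injEq, h1, h2, and_self, decide_true, if_pos]
        constructor <;> push_cast <;> ring
      · rw [if_pos h1, if_neg h2, ih]
        simp only [Prod.mk.injEq, h1, h2, and_false, decide_true, decide_false,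
          Bool.false_eq_true, if_false, if_pos]
        constructor <;> push_cast <;> ring
    · rw [if_neg h1, ih]
      simp only [Prod.mk.injEq, h1, false_and, decide_false, Bool.false_eq_true, if_false]
      constructor <;> push_cast <;> ring

-- C(c+1, 2) = C(c, 2) + c  (Python floor division by 2)
theorem pv_ch2_succ (c : Int) :
    PySem.Int.floordiv ((c + 1) * c) 2 = PySem.Int.floordiv (c * (c - 1)) 2 + c := by
  obtain ⟨m, hm⟩ : ∃ m, c * (c - 1) = 2 * m := by
    rcases Int.even_or_odd c with ⟨m, hm⟩ | ⟨m, hm⟩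
    · exact ⟨m * (c - 1), by rw [hm]; ring⟩
    · exact ⟨c * m, by rw [hm]; ring⟩
  have hm' : (c + 1) * c = 2 * (m + c) := by
    have hx : (c + 1) * c = c * (c - 1) + 2 * c := by ring
    rw [hx, hm]; ring
  rw [hm, hm', PySem.Int.floordiv_eq_ediv_of_pos (by norm_num), PySem.Int.floordiv_eq_ediv_of_pos (by norm_num)]
  rw [Int.mul_ediv_cancel_left _ (by norm_num), Int.mul_ediv_cancel_left _ (by norm_num)]

-- the grouped sum of C(count, 2) over the distinct elements equals the pair count
theorem pv_finsum {α : Type} [BEq α] [LawfulBEq α] [DecidableEq α] (l : List α) :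
    (∑ k ∈ l.toFinset, PySem.Int.floordiv (((l.count k : Int)) * ((l.count k : Int) - 1)) 2) = (pairCt l : Int) := by
  induction l with
  | nil => simp [pairCt]
  | cons a t ih =>
    rw [List.toFinset_cons, pairCt]
    by_cases ha : a ∈ t.toFinset
    · rw [Finset.insert_eq_self.mpr ha]
      rw [← Finset.add_sum_erase _ _ ha] at ih ⊢
      have hcongr : ∀ k ∈ t.toFinset.erase a,
          PySem.Int.floordiv ((((a :: t).count k : Int)) * (((a :: t).count k : Int) - 1)) 2
          = PySem.Int.floordiv (((t.count k : Int)) * ((t.count k : Int) - 1)) 2 := by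
        intro k hk
        have : k ≠ a := Finset.ne_of_mem_erase hk
        rw [List.count_cons]
        simp [this.symm]
      rw [Finset.sum_congr rfl hcongr]
      have hcnt : ((a :: t).count a : Int) = (t.count a : Int) + 1 := by
        rw [List.count_cons]; simp
      rw [hcnt]
      have hstep : PySem.Int.floordiv (((t.count a : Int) + 1) * ((t.count a : Int) + 1 - 1)) 2
          = PySem.Int.floordiv ((t.count a : Int) * ((t.count a : Int) - 1)) 2 + (t.count a : Int) := by
        have h0 : ((t.count a : Int) + 1 - 1) = (t.count a : Int) := by ring
        rw [h0]
        exact pv_ch2_succ _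
      rw [hstep]
      push_cast
      linarith [ih]
    · have ha' : a ∉ t := fun h => ha (List.mem_toFinset.mpr h)
      rw [Finset.sum_insert ha]
      have hcnt : ((a :: t).count a : Int) = 1 := by
        rw [List.count_cons]; simp [List.count_eq_zero_of_not_mem ha']
      have hcongr : ∀ k ∈ t.toFinset,
          PySem.Int.floordiv ((((a :: t).count k : Int)) * (((a :: t).count k : Int) - 1)) 2
          = PySem.Int.floordiv (((t.count k : Int)) * ((t.count k : Int) - 1)) 2 := by
        intro k hk
        have : k ≠ a := fun h => ha (h ▸ hk)
        rw [List.count_cons]; simp [this.symm]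
      rw [Finset.sum_congr rfl hcongr, ih, hcnt]
      have h0 : List.count a t = 0 := List.count_eq_zero_of_not_mem ha'
      rw [h0]
      norm_num [PySem.Int.floordiv_eq_ediv_of_pos]

-- B's summed counter values equal the pair count
theorem pv_bsum {α : Type} [BEq α] [LawfulBEq α] [DecidableEq α] (l : List α) :
    (((PySem.Dict.counter l).values).map (fun k => PySem.Int.floordiv (k * (k - 1)) 2)).sum = (pairCt l : Int) := by
  have hv : (PySem.Dict.counter l).values
      = (PySem.Set.ofList l).map (fun k => ((l.count k : Int))) := by
    show ((PySem.Dict.counter l).items).map (·.2) = _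
    rw [PySem.Dict.items_counter, List.map_map]
    rfl
  rw [hv, List.map_map]
  have hnd : (PySem.Set.ofList l).Nodup := PySem.Set.nodup_ofList l
  have hfin : (PySem.Set.ofList l).toFinset = l.toFinset := by
    apply Finset.ext; intro x
    simp [List.mem_toFinset, PySem.Set.mem_ofList]
  rw [← List.sum_toFinset _ hnd, hfin]
  exact pv_finsum l

-- pvComb2 under Pre_ : the correct-pair count reduces to the zipped list
theorem pv_cc_count (y z : List Int) (hpre : Pre_TestValues y z) :
    (pvComb2 y.length).countP
      (fun q => decide (y.getD q.1 0 = y.getD q.2 0 ∧ z.getD q.1 0 = z.getD q.2 0))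
    = pairCt (y.zip z) := by
  set m := (y.zip z).length with hm
  have hmin : m = min y.length z.length := by rw [hm, List.length_zip]
  have hcut := pv_countP_comb2_cut y.length m
    (fun q => decide (y.getD q.1 0 = y.getD q.2 0 ∧ z.getD q.1 0 = z.getD q.2 0))
    (by omega)
    (by
      intro i j hij hjn hmj
      simp only [decide_eq_false_iff_not, not_and]
      intro hy hz
      have := hpre j hjn i hij hy
      omega)
  rw [hcut]
  have hcong : (pvComb2 m).countP
      (fun q => decide (y.getD q.1 0 = y.getD q.2 0 ∧ z.getD q.1 0 = z.getD q.2 0))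
      = (pvComb2 m).countP (fun q => decide ((y.zip z).getD q.1 (0, 0) = (y.zip z).getD q.2 (0, 0))) := by
    apply List.countP_congr
    intro q hq
    obtain ⟨hij, hjm⟩ := pv_mem_comb2 hq
    have h1 : q.1 < m := by omega
    have hy1 : q.1 < y.length := by omega
    have hy2 : q.2 < y.length := by omega
    have hz1 : q.1 < z.length := by omega
    have hz2 : q.2 < z.length := by omega
    have e1 : y.getD q.1 0 = y[q.1] := List.getD_eq_getElem y 0 hy1
    have e2 : y.getD q.2 0 = y[q.2] := List.getD_eq_getElem y 0 hy2
    have e3 : z.getD q.1 0 = z[q.1] := List.getD_eq_getElem z 0 hz1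
    have e4 : z.getD q.2 0 = z[q.2] := List.getD_eq_getElem z 0 hz2
    have e5 : (y.zip z).getD q.1 (0, 0) = (y[q.1], z[q.1]) := by
      rw [List.getD_eq_getElem (y.zip z) (0, 0) (by omega)]
      exact List.getElem_zip
    have e6 : (y.zip z).getD q.2 (0, 0) = (y[q.2], z[q.2]) := by
      rw [List.getD_eq_getElem (y.zip z) (0, 0) (by omega)]
      exact List.getElem_zip
    rw [e1, e2, e3, e4, e5, e6]
    simp [Prod.ext_iff]
  rw [hcong, hm]
  exact pv_countP_comb2 (y.zip z) (0, 0)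

-- ===== VERDICT (by name: the statement is the Claim_ definition above) =====
theorem TestValues_spec : Claim_equal_TestValues := by
  intro y z _ hpre
  unfold Spec_TestValues TestValues TestValues_alt
  simp only
  rw [pv_foldA, PySem.Dict.foldl_insert_getD_add_one_eq_counter,
      PySem.Dict.foldl_insert_getD_add_one_eq_counter, pv_bsum, pv_bsum,
      pv_countP_comb2 y 0, pv_cc_count y z hpre]
  simp
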